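-- pv_equiv track=rewrite | github.com/bor0/misc | 2022/sudosum.py | calc3
-- ===== SOURCE A (Python) =====
-- def calc3(s):
--     x=set()
--     for i in range(1,10):
--         for j in range(1,10):
--             for k in range(1,10):
--                 if i==j or i==k or j==k: continue
--                 elif i+j+k != s: continue
--                 x.add(i)
--                 x.add(j)
--                 x.add(k)
--     return x
-- ===== SOURCE B (Python) =====
-- def calc3(s):
--     return {d for d in range(1, 10)
--             if any(a < s - d - a and s - d - a <= 9 and a != d and s - d - a != d
--                    for a in range(1, 10))}
-- ===== Notes on version B (the rewrite author's own statement) =====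
-- stated objective: alternative
-- what changed: Replaces A's triple enumeration over all ordered (i,j,k) with a per-digit membership test: for each digit d it checks whether s-d is a two-sum a+b of distinct digits a<b both different from d.
import Mathlib
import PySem

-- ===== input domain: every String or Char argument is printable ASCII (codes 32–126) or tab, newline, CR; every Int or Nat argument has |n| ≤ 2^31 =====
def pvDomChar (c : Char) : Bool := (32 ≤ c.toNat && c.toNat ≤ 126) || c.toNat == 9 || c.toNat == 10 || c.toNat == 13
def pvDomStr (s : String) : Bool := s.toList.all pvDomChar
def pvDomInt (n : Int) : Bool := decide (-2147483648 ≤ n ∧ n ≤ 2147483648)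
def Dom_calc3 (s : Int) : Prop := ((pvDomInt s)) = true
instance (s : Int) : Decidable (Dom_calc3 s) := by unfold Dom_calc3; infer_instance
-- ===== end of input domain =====

-- B replaces A's triple enumeration by a per-digit two-sum membership test (alternative decomposition;
-- not measurably faster — both are fixed-size scans). Both Pythons return a set; Python set iteration
-- order is not modelled (PySem.Set), so both ports return the set's elements in ascending order as the
-- canonical list representation; the equivalence proved is equality of the returned sets.

-- ===== PORT A =====
def calc3 (s : Int) : List Int :=
  let x : PySem.Set Int :=
    (PySem.List.pyRange 1 10 1).foldl (fun x i =>
      (PySem.List.pyRange 1 10 1).foldl (fun x j =>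
        (PySem.List.pyRange 1 10 1).foldl (fun x k =>
          if i = j ∨ i = k ∨ j = k then x
          else if i + j + k ≠ s then x
          else ((x.add i).add j).add k) x) x) PySem.Set.empty
  PySem.List.sorted x (fun v => v) false  -- canonical ascending enumeration of the returned set

-- ===== PORT B =====
def calc3_alt (s : Int) : List Int :=
  PySem.Set.ofList ((PySem.List.pyRange 1 10 1).filter (fun d =>
    (PySem.List.pyRange 1 10 1).any (fun a =>
      decide (a < s - d - a) && decide (s - d - a ≤ 9) && a != d && (s - d - a) != d)))

-- ===== PRECONDITION & SPEC =====
def Spec_calc3 (s : Int) (out : List Int) : Prop := out = calc3_alt s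
instance (s : Int) (out : List Int) : Decidable (Spec_calc3 s out) := by unfold Spec_calc3; infer_instance

-- ===== CLAIM (what is proved, stated in full; the proofs are below) =====
def Claim_equal_calc3 : Prop := ∀ (s : Int), Dom_calc3 s → Spec_calc3 s (calc3 s)

-- ===== LEMMAS AND PROOFS =====

theorem pv_foldl_id {α β : Type} (l : List β) (f : α → β → α)
    (h : ∀ a b, b ∈ l → f a b = a) : ∀ x : α, l.foldl f x = x := by
  induction l with
  | nil => intro x; rfl
  | cons b t ih =>
      intro x
      rw [List.foldl_cons, h x b (List.mem_cons_self), ih]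
      intro a b' hb'; exact h a b' (List.mem_cons_of_mem _ hb')

theorem calc3_empty_of_out (s : Int) (h : s < 3 ∨ 27 < s) : calc3 s = [] := by
  unfold calc3
  have hx : ∀ x : PySem.Set Int,
      (PySem.List.pyRange 1 10 1).foldl (fun x i =>
        (PySem.List.pyRange 1 10 1).foldl (fun x j =>
          (PySem.List.pyRange 1 10 1).foldl (fun x k =>
            if i = j ∨ i = k ∨ j = k then x
            else if i + j + k ≠ s then x
            else ((x.add i).add j).add k) x) x) x = x := by
    intro x
    refine pv_foldl_id _ _ (fun a i hi => ?_) x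
    refine pv_foldl_id _ _ (fun a' j hj => ?_) a
    refine pv_foldl_id _ _ (fun a'' k hk => ?_) a'
    rw [PySem.List.mem_pyRange_one] at hi hj hk
    split_ifs with h1 h2
    · rfl
    · rfl
    · omega
  rw [hx]
  rfl

theorem calc3_alt_empty_of_out (s : Int) (h : s < 3 ∨ 27 < s) : calc3_alt s = [] := by
  unfold calc3_alt
  have hf : (PySem.List.pyRange 1 10 1).filter (fun d =>
      (PySem.List.pyRange 1 10 1).any (fun a =>
        decide (a < s - d - a) && decide (s - d - a ≤ 9) && a != d && (s - d - a) != d)) = [] := by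
    rw [List.filter_eq_nil_iff]
    intro d hd
    rw [PySem.List.mem_pyRange_one] at hd
    simp only [List.any_eq_true, Bool.and_eq_true, decide_eq_true_eq, bne_iff_ne, not_exists]
    rintro a ⟨ha, ⟨⟨⟨h1, h2⟩, _⟩, _⟩⟩
    rw [PySem.List.mem_pyRange_one] at ha
    omega
  rw [hf]
  rfl

-- ===== VERDICT (by name: the statement is the Claim_ definition above) =====
theorem calc3_spec : Claim_equal_calc3 := by
  intro s _
  unfold Spec_calc3
  by_cases hlo : s < 3
  · rw [calc3_empty_of_out s (Or.inl hlo), calc3_alt_empty_of_out s (Or.inl hlo)]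
  · by_cases hhi : 27 < s
    · rw [calc3_empty_of_out s (Or.inr hhi), calc3_alt_empty_of_out s (Or.inr hhi)]
    · have h3 : 3 ≤ s := by omega
      have h27 : s ≤ 27 := by omega
      interval_cases s <;> (set_option maxRecDepth 40000 in decide)
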